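-- pv_equiv track=rewrite | github.com/FerLo002/CifradosSimetricos | cifradoMatrices.py | desc_fil
-- ===== SOURCE A (Python) =====
-- def desc_fil(mensaje_cifrado, ren):
--     # Calcular el número de columnas en función del tamaño del mensaje cifrado y el número de renglones
--     col = (len(mensaje_cifrado) + ren - 1) // ren
--
--     # Crear una matriz vacía con las dimensiones adecuadas
--     matriz = [[''] * col for _ in range(ren)]
--
--     # Variables para rastrear la posición actual en el mensaje cifrado
--     char_index = 0
--
--     # Llenar la matriz en orden de columna desde el mensaje cifrado
--     for i in range(ren):
--         for j in range(col):
--             if char_index < len(mensaje_cifrado):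
--                 matriz[i][j] = mensaje_cifrado[char_index]
--                 char_index += 1
--
--     # Construir el mensaje original leyendo las columnas en orden
--     mensaje_original = ''
--     for j in range(col):
--         for i in range(ren):
--             mensaje_original += matriz[i][j]
--
--     mensaje_original = ''.join([c for c in mensaje_original if c != 'x'])
--
--     return mensaje_original
-- ===== SOURCE B (Python) =====
-- def desc_fil(mensaje_cifrado, ren):
--     col = (len(mensaje_cifrado) + ren - 1) // ren
--     partes = []
--     for j in range(col):
--         for i in range(ren):
--             k = i * col + j
--             if k < len(mensaje_cifrado):
--                 partes.append(mensaje_cifrado[k])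
--     return ''.join(c for c in partes if c != 'x')
-- ===== Notes on version B (the rewrite author's own statement) =====
-- stated objective: simpler
-- what changed: B drops A's fill-a-matrix-then-read-it two-pass scheme and gathers the column-major characters in one pass by direct index arithmetic (mensaje_cifrado[i*col+j] when in range), with no intermediate matrix.
import Mathlib
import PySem

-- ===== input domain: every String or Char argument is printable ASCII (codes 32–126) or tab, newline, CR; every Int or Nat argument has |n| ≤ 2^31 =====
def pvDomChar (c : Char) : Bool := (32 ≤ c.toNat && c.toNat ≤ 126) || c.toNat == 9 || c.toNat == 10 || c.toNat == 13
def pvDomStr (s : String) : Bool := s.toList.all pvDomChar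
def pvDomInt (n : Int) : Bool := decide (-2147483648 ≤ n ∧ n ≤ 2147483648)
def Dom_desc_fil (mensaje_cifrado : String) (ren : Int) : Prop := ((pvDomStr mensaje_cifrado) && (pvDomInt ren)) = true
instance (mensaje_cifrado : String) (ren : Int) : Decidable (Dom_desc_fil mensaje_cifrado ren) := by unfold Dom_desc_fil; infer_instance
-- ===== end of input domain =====

-- B replaces A's fill-a-matrix-then-read-it two-pass scheme with a single direct-index gather (simpler; no intermediate matrix).

-- ===== PORT A =====
-- Python list assignment xs[i] = v; every index this program assigns is ≥ 0 and in range, so List.set is exact here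
def pvSet {α : Type} (xs : List α) (i : Int) (v : α) : List α :=
  if 0 ≤ i then xs.set i.toNat v else xs

def desc_fil (mensaje_cifrado : String) (ren : Int) : String :=
  let cs := mensaje_cifrado.toList
  let col : Int := PySem.Int.floordiv ((cs.length : Int) + ren - 1) ren
  -- matriz = [[''] * col for _ in range(ren)]; each cell is a Python str, ported as List Char
  let matriz : List (List (List Char)) :=
    (PySem.List.pyRange 0 ren 1).map (fun _ => (PySem.List.pyRange 0 col 1).map (fun _ => ([] : List Char)))
  -- fill loop, state = (matriz, char_index)
  let fin :=
    (PySem.List.pyRange 0 ren 1).foldl (fun (st : List (List (List Char)) × Int) i =>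
      (PySem.List.pyRange 0 col 1).foldl (fun (st : List (List (List Char)) × Int) j =>
        if st.2 < (cs.length : Int) then
          (pvSet st.1 i (pvSet ((PySem.List.pyGet? st.1 i).getD []) j
              [(PySem.List.pyGet? cs st.2).getD ' ']), st.2 + 1)
        else st) st) (matriz, (0 : Int))
  -- read loop: mensaje_original += matriz[i][j]
  let mensaje_original : List Char :=
    (PySem.List.pyRange 0 col 1).foldl (fun (acc : List Char) j =>
      (PySem.List.pyRange 0 ren 1).foldl (fun (acc : List Char) i =>
        acc ++ (PySem.List.pyGet? ((PySem.List.pyGet? fin.1 i).getD []) j).getD []) acc) []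
  String.ofList (mensaje_original.filter (fun c => c ≠ 'x'))

-- ===== PORT B =====
def desc_fil_alt (mensaje_cifrado : String) (ren : Int) : String :=
  let cs := mensaje_cifrado.toList
  let col : Int := PySem.Int.floordiv ((cs.length : Int) + ren - 1) ren
  let partes : List Char :=
    (PySem.List.pyRange 0 col 1).foldl (fun (acc : List Char) j =>
      (PySem.List.pyRange 0 ren 1).foldl (fun (acc : List Char) i =>
        if i * col + j < (cs.length : Int) then acc ++ [(PySem.List.pyGet? cs (i * col + j)).getD ' '] else acc) acc) []
  String.ofList (partes.filter (fun c => c ≠ 'x'))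

-- ===== PRECONDITION & SPEC =====
-- ren = 0 makes the Python A raise ZeroDivisionError at 'col = ... // ren'; Pre_ excludes exactly that
def Pre_desc_fil (mensaje_cifrado : String) (ren : Int) : Prop := ren ≠ 0
instance (mensaje_cifrado : String) (ren : Int) : Decidable (Pre_desc_fil mensaje_cifrado ren) := by unfold Pre_desc_fil; infer_instance
def pvWitness_desc_fil : String × Int := ("hloxa", 2)

def Spec_desc_fil (mensaje_cifrado : String) (ren : Int) (out : String) : Prop := out = desc_fil_alt mensaje_cifrado ren
instance (mensaje_cifrado : String) (ren : Int) (out : String) : Decidable (Spec_desc_fil mensaje_cifrado ren out) := by unfold Spec_desc_fil; infer_instance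

-- ===== CLAIM (what is proved, stated in full; the proofs are below) =====
def Claim_equal_desc_fil : Prop := ∀ (mensaje_cifrado : String) (ren : Int), Dom_desc_fil mensaje_cifrado ren → Pre_desc_fil mensaje_cifrado ren → Spec_desc_fil mensaje_cifrado ren (desc_fil mensaje_cifrado ren)

-- ===== LEMMAS AND PROOFS =====

def pvRowFill (cs : List Char) (ci : Int) (k : Nat) : List (List Char) :=
  (List.range k).map (fun j => if ci + (j:Int) < (cs.length:Int) then [(PySem.List.pyGet? cs (ci + (j:Int))).getD ' '] else ([]:List Char))

lemma pvRowFill_succ (cs : List Char) (ci : Int) (k : Nat) :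
    pvRowFill cs ci (k+1) = pvRowFill cs ci k ++ [if ci + (k:Int) < (cs.length:Int) then [(PySem.List.pyGet? cs (ci + (k:Int))).getD ' '] else ([]:List Char)] := by
  simp [pvRowFill, List.range_succ]

lemma pvRowFill_length (cs : List Char) (ci : Int) (k : Nat) : (pvRowFill cs ci k).length = k := by
  simp [pvRowFill]

lemma pvRowFill_min (cs : List Char) (a : Int) (c : Nat) :
    pvRowFill cs (min a (cs.length:Int)) c = pvRowFill cs a c := by
  by_cases h1 : a ≤ (cs.length:Int)
  · rw [min_eq_left h1]
  · rw [min_eq_right (by omega)]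
    unfold pvRowFill
    apply List.map_congr_left
    intro j hj
    have hj0 : 0 ≤ j := by
      simp at hj
      omega
    rw [if_neg (by omega), if_neg (by omega)]

lemma inner_fill (cs : List Char) (P S : List (List (List Char))) (k : Nat) :
  ∀ (T : List (List Char)) (ci : Int), 0 ≤ ci → ci ≤ (cs.length : Int) →
  List.foldl (fun (st : List (List (List Char)) × Int) (j : Int) =>
      if st.2 < (cs.length : Int) then
        (pvSet st.1 (P.length : Int) (pvSet ((PySem.List.pyGet? st.1 (P.length : Int)).getD []) j
            [(PySem.List.pyGet? cs st.2).getD ' ']), st.2 + 1)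
      else st)
    (P ++ (List.replicate k ([]:List Char) ++ T) :: S, ci) (PySem.List.pyRange 0 (k:Int) 1)
  = (P ++ (pvRowFill cs ci k ++ T) :: S, min (ci + (k:Int)) (cs.length : Int)) := by
  induction k with
  | zero =>
      intro T ci h0 h1
      simp only [Nat.cast_zero, PySem.List.pyRange_one_eq_nil (le_refl (0:Int))]
      simp [pvRowFill]
      omega
  | succ k ih =>
      intro T ci h0 h1
      have hcast : ((k+1 : Nat) : Int) = (k:Int) + 1 := by push_cast; ring
      rw [hcast, PySem.List.pyRange_one_succ_right (by positivity), List.foldl_append]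
      have hrep : List.replicate (k+1) ([]:List Char) ++ T = List.replicate k ([]:List Char) ++ (([]:List Char) :: T) := by
        rw [List.replicate_succ']; simp
      rw [hrep, ih (([]:List Char) :: T) ci h0 h1]
      simp only [List.foldl_cons, List.foldl_nil]
      by_cases hck : ci + (k:Int) < (cs.length : Int)
      · rw [if_pos (by omega)]
        have hmin : min (ci + (k:Int)) (cs.length:Int) = ci + (k:Int) := by omega
        rw [hmin]
        rw [PySem.List.pyGet?_append_length]
        simp only [Option.getD_some]
        have hset1 : pvSet (pvRowFill cs ci k ++ ([]:List Char) :: T) (k:Int) [(PySem.List.pyGet? cs (ci + (k:Int))).getD ' ']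
            = pvRowFill cs ci k ++ [(PySem.List.pyGet? cs (ci + (k:Int))).getD ' '] :: T := by
          rw [pvSet, if_pos (by positivity), Int.toNat_natCast]
          rw [List.set_append_right _ _ (le_of_eq (pvRowFill_length cs ci k))]
          simp [pvRowFill_length]
        rw [hset1]
        have hset2 : pvSet (P ++ (pvRowFill cs ci k ++ ([]:List Char) :: T) :: S) ((P.length:Nat) : Int)
            (pvRowFill cs ci k ++ [(PySem.List.pyGet? cs (ci + (k:Int))).getD ' '] :: T)
            = P ++ (pvRowFill cs ci k ++ [(PySem.List.pyGet? cs (ci + (k:Int))).getD ' '] :: T) :: S := by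
          rw [pvSet, if_pos (by positivity), Int.toNat_natCast]
          rw [List.set_append_right _ _ (le_refl _)]
          simp
        rw [hset2, pvRowFill_succ, if_pos hck]
        simp only [Prod.mk.injEq]
        exact ⟨by simp, by omega⟩
      · rw [if_neg (by omega)]
        rw [pvRowFill_succ, if_neg hck]
        simp only [Prod.mk.injEq]
        exact ⟨by simp, by omega⟩

lemma outer_fill (cs : List Char) (c : Nat) :
  ∀ (r R : Nat), r ≤ R →
  List.foldl (fun (st : List (List (List Char)) × Int) (i : Int) =>
      List.foldl (fun (st : List (List (List Char)) × Int) (j : Int) =>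
        if st.2 < (cs.length : Int) then
          (pvSet st.1 i (pvSet ((PySem.List.pyGet? st.1 i).getD []) j
              [(PySem.List.pyGet? cs st.2).getD ' ']), st.2 + 1)
        else st) st (PySem.List.pyRange 0 (c:Int) 1))
    (List.replicate R (List.replicate c ([]:List Char)), 0) (PySem.List.pyRange 0 (r:Int) 1)
  = ((List.range r).map (fun i => pvRowFill cs ((i:Int) * (c:Int)) c)
       ++ List.replicate (R - r) (List.replicate c ([]:List Char)),
     min ((r:Int) * (c:Int)) (cs.length : Int)) := by
  intro r
  induction r with
  | zero =>
      intro R hR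
      simp only [Nat.cast_zero, PySem.List.pyRange_one_eq_nil (le_refl (0:Int))]
      simp
  | succ r ih =>
      intro R hR
      have hcast : ((r+1 : Nat) : Int) = (r:Int) + 1 := by push_cast; ring
      rw [hcast, PySem.List.pyRange_one_succ_right (by positivity), List.foldl_append]
      rw [ih R (by omega)]
      simp only [List.foldl_cons, List.foldl_nil]
      have hrep : List.replicate (R - r) (List.replicate c ([]:List Char))
          = (List.replicate c ([]:List Char) ++ []) :: List.replicate (R - (r+1)) (List.replicate c ([]:List Char)) := by
        have : R - r = (R - (r+1)) + 1 := by omega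
        rw [this, List.replicate_succ]
        simp
      rw [hrep]
      have hP : ((List.range r).map (fun i => pvRowFill cs ((i:Int) * (c:Int)) c)).length = r := by simp
      have := inner_fill cs ((List.range r).map (fun i => pvRowFill cs ((i:Int) * (c:Int)) c))
        (List.replicate (R - (r+1)) (List.replicate c ([]:List Char))) c []
        (min ((r:Int) * (c:Int)) (cs.length : Int))
        (by have : (0:Int) ≤ (r:Int) * (c:Int) := by positivity
            omega)
        (by omega)
      rw [hP] at this
      rw [this]
      have hrow : pvRowFill cs (min ((r:Int) * (c:Int)) (cs.length : Int)) c
          = pvRowFill cs ((r:Int) * (c:Int)) c := pvRowFill_min cs _ c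
      rw [hrow]
      simp only [Prod.mk.injEq]
      constructor
      · rw [List.range_succ]
        simp
      · have h0 : (0:Int) ≤ (r:Int) * (c:Int) := by positivity
        have hmul : ((r:Int) + 1) * (c:Int) = (r:Int) * (c:Int) + (c:Int) := by ring
        rw [hmul]
        omega

lemma read_eq (cs : List Char) (c r : Nat) :
  List.foldl (fun (acc : List Char) (j : Int) =>
    List.foldl (fun (acc : List Char) (i : Int) =>
      acc ++ (PySem.List.pyGet? ((PySem.List.pyGet? ((List.range r).map (fun i => pvRowFill cs ((i:Int) * (c:Int)) c)) i).getD []) j).getD [])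
      acc (PySem.List.pyRange 0 (r:Int) 1))
    [] (PySem.List.pyRange 0 (c:Int) 1)
  = List.foldl (fun (acc : List Char) (j : Int) =>
      List.foldl (fun (acc : List Char) (i : Int) =>
        if i * (c:Int) + j < (cs.length:Int) then acc ++ [(PySem.List.pyGet? cs (i * (c:Int) + j)).getD ' '] else acc)
      acc (PySem.List.pyRange 0 (r:Int) 1))
    [] (PySem.List.pyRange 0 (c:Int) 1) := by
  apply PySem.List.foldl_congr_mem
  intro acc j hj
  apply PySem.List.foldl_congr_mem
  intro acc' i hi
  rw [PySem.List.mem_pyRange_one] at hj hi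
  rw [PySem.List.pyGet?_of_nonneg _ hi.1]
  have hir : i.toNat < r := by omega
  have hi' : ((i.toNat : Nat) : Int) = i := Int.toNat_of_nonneg hi.1
  rw [show ((List.range r).map (fun i => pvRowFill cs ((i:Int) * (c:Int)) c))[i.toNat]?
      = some (pvRowFill cs (((i.toNat : Nat) : Int) * (c:Int)) c) from by
    simp [Int.toNat_of_nonneg hi.1]
    simp only [← List.map_eq_flatMap]
    simp [hir, Int.toNat_of_nonneg hi.1]]
  rw [hi']
  simp only [Option.getD_some]
  rw [PySem.List.pyGet?_of_nonneg _ hj.1]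
  have hjc : j.toNat < c := by omega
  have hj' : ((j.toNat : Nat) : Int) = j := Int.toNat_of_nonneg hj.1
  rw [show (pvRowFill cs (i * (c:Int)) c)[j.toNat]?
      = some (if i * (c:Int) + ((j.toNat : Nat) : Int) < (cs.length:Int)
              then [(PySem.List.pyGet? cs (i * (c:Int) + ((j.toNat : Nat) : Int))).getD ' '] else []) from by
    simp [pvRowFill, Int.toNat_of_nonneg hj.1]
    simp only [← List.map_eq_flatMap]
    simp [hjc, Int.toNat_of_nonneg hj.1]]
  rw [hj']
  simp only [Option.getD_some]
  by_cases hcond : i * (c:Int) + j < (cs.length:Int)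
  · rw [if_pos hcond, if_pos hcond]
  · rw [if_neg hcond, if_neg hcond, List.append_nil]

lemma main_eq (m : String) (ren : Int) (h : ren ≠ 0) : desc_fil m ren = desc_fil_alt m ren := by
  by_cases hr : ren < 0
  · have hnil : PySem.List.pyRange 0 ren 1 = [] := PySem.List.pyRange_one_eq_nil hr.le
    simp only [desc_fil, desc_fil_alt, hnil, List.foldl_nil]
  · have hrpos : 0 < ren := by omega
    have hren : ren = ((ren.toNat : Nat) : Int) := (Int.toNat_of_nonneg hrpos.le).symm
    have hcolnn : 0 ≤ PySem.Int.floordiv ((m.toList.length : Int) + ren - 1) ren := by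
      rw [PySem.Int.floordiv_eq_ediv_of_pos hrpos]
      apply Int.ediv_nonneg _ hrpos.le
      have : (0:Int) ≤ (m.toList.length : Int) := by positivity
      omega
    have hc : PySem.Int.floordiv ((m.toList.length : Int) + ren - 1) ren
        = (((PySem.Int.floordiv ((m.toList.length : Int) + ren - 1) ren).toNat : Nat) : Int) :=
      (Int.toNat_of_nonneg hcolnn).symm
    set c : Nat := (PySem.Int.floordiv ((m.toList.length : Int) + ren - 1) ren).toNat with hcdef
    set r : Nat := ren.toNat with hrdef
    simp only [desc_fil, desc_fil_alt]
    rw [hc, hren]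
    have hmat : (PySem.List.pyRange 0 ((r:Nat):Int) 1).map
        (fun _ => (PySem.List.pyRange 0 ((c:Nat):Int) 1).map (fun _ => ([]:List Char)))
        = List.replicate r (List.replicate c ([]:List Char)) := by
      rw [List.map_const', List.map_const']
      simp [PySem.List.length_pyRange_one]
    rw [hmat]
    rw [outer_fill m.toList c r r (le_refl r)]
    simp only [Nat.sub_self, List.replicate_zero, List.append_nil]
    rw [read_eq]

-- ===== VERDICT (by name: the statement is the Claim_ definition above) =====
theorem desc_fil_spec : Claim_equal_desc_fil := by
  intro m ren _ hpre
  unfold Spec_desc_fil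
  exact main_eq m ren hpre
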